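-- pv_equiv track=rewrite | github.com/nanotecnologista/back | back/resume_generator.py | _reorder_skills
-- ===== SOURCE A (Python) =====
-- from typing import Dict, List, Optional
--
-- def _reorder_skills(skills: List[str], job_text: str) -> List[str]:
--     """Reordena skills baseado na relevância para a vaga."""
--     job_text = job_text.lower()
--
--     # Calcular pontuação de relevância para cada skill
--     skill_scores = []
--     for skill in skills:
--         score = 0
--         if skill.lower() in job_text:
--             score = job_text.count(skill.lower())
--         skill_scores.append((skill, score))
--
--     # Ordenar por relevância
--     skill_scores.sort(key=lambda x: x[1], reverse=True)
--
--     return [skill for skill, score in skill_scores]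
-- ===== SOURCE B (Python) =====
-- def _reorder_skills(skills, job_text):
--     """Bucket the skills by occurrence count, then emit buckets by decreasing count."""
--     text = job_text.lower()
--     buckets = {}
--     for skill in skills:
--         buckets.setdefault(text.count(skill.lower()), []).append(skill)
--     out = []
--     for score in sorted(buckets, reverse=True):
--         out.extend(buckets[score])
--     return out
-- ===== Notes on version B (the rewrite author's own statement) =====
-- stated objective: alternative
-- what changed: Replaces the build-score-pairs-then-comparison-sort pipeline by a bucket (counting) sort: skills are grouped into a dict keyed by occurrence count in one pass, then the distinct counts are sorted descending and the buckets concatenated.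
import Mathlib
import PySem

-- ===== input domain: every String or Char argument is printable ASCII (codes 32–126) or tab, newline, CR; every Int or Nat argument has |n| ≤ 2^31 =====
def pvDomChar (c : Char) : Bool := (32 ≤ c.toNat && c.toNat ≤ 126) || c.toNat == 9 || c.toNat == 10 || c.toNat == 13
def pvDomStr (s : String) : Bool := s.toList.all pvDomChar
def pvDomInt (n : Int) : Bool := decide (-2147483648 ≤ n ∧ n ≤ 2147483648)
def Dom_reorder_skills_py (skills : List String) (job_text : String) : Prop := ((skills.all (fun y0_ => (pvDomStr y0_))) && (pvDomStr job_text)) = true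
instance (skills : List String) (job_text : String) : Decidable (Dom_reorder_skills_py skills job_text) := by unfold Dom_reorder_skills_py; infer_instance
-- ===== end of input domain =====

-- B replaces A's build-score-pairs-then-stable-comparison-sort by a bucket (counting) sort:
-- group the skills into a dict keyed by occurrence count, sort the distinct counts, concatenate the buckets ("alternative").

-- ===== PORT A =====
def reorder_skills_py (skills : List String) (job_text : String) : List String :=
  let job_text2 := PySem.Str.lower job_text
  let skill_scores : List (String × Int) :=
    skills.foldl (fun acc skill =>
      let score : Int :=
        if PySem.Str.isIn (PySem.Str.lower skill) job_text2 then
          (PySem.Str.count job_text2 (PySem.Str.lower skill) : Int)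
        else 0
      acc ++ [(skill, score)]) []
  let sortedScores := PySem.List.sorted skill_scores (fun x => x.2) true
  sortedScores.map (fun p => p.1)

-- ===== PORT B =====
def reorder_skills_py_alt (skills : List String) (job_text : String) : List String :=
  let text := PySem.Str.lower job_text
  let buckets : PySem.Dict Int (List String) :=
    skills.foldl (fun d skill =>
      d.modify ((PySem.Str.count text (PySem.Str.lower skill) : Int)) [] (fun cur => cur ++ [skill]))
      PySem.Dict.empty
  (PySem.List.sorted buckets.keys (fun s => s) true).foldl
    (fun out score => out ++ buckets.getD score []) []

-- ===== PRECONDITION & SPEC =====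
def Spec_reorder_skills_py (skills : List String) (job_text : String) (out : List String) : Prop := out = reorder_skills_py_alt skills job_text
instance (skills : List String) (job_text : String) (out : List String) : Decidable (Spec_reorder_skills_py skills job_text out) := by unfold Spec_reorder_skills_py; infer_instance

-- ===== CLAIM (what is proved, stated in full; the proofs are below) =====
def Claim_equal_reorder_skills_py : Prop := ∀ (skills : List String) (job_text : String), Dom_reorder_skills_py skills job_text → Spec_reorder_skills_py skills job_text (reorder_skills_py skills job_text)

-- ===== LEMMAS AND PROOFS =====

-- the score both programs bucket/sort by: occurrences of the lowered skill in the lowered text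
def pvKey (t : String) (sk : String) : Int := (PySem.Str.count t (PySem.Str.lower sk) : Int)

-- Python's s.count(sub) is 0 whenever `sub in s` is false
lemma pv_go_eq_of_not_infix (sub : List Char) :
    ∀ (fuel : Nat) (l : List Char) (acc : Nat), ¬ sub <:+: l →
      PySem.Chars.count.go sub fuel l acc = acc := by
  intro fuel
  induction fuel with
  | zero => intro l acc _; cases l <;> rfl
  | succ n ih =>
    intro l acc h
    cases l with
    | nil => rfl
    | cons c t =>
      have hp : sub.isPrefixOf (c :: t) = false := by
        by_contra hh
        exact h (List.IsPrefix.isInfix (List.isPrefixOf_iff_prefix.mp (by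
          cases hb : sub.isPrefixOf (c :: t) <;> simp_all)))
      rw [PySem.Chars.count.go]
      simp only [hp, Bool.false_eq_true, if_false]
      refine ih t acc (fun hi => h ?_)
      obtain ⟨u, v, huv⟩ := hi
      exact ⟨c :: u, v, by simp [huv]⟩

lemma pv_count_eq_zero (s sub : String) (h : PySem.Str.isIn sub s = false) :
    PySem.Str.count s sub = 0 := by
  have hninf : ¬ sub.toList <:+: s.toList := by
    intro hi
    have h2 := (PySem.Str.isIn_iff_infix sub s).mpr hi
    rw [h] at h2
    exact Bool.false_ne_true h2
  rw [PySem.Str.count_eq, PySem.Chars.count]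
  rcases hl : sub.toList with _ | ⟨c, cs⟩
  · exact absurd (by rw [hl]; exact List.nil_infix) hninf
  · rw [hl] at hninf
    rw [if_neg (by simp)]
    exact pv_go_eq_of_not_infix (c :: cs) s.toList.length s.toList 0 hninf

-- flatMap congruence on members
lemma pv_flatMap_congr {α β : Type} (l : List α) (f g : α → List β)
    (h : ∀ a ∈ l, f a = g a) : l.flatMap f = l.flatMap g := by
  rw [List.flatMap_def, List.flatMap_def, List.map_congr_left h]

-- insertBy into a list split into a "not before" prefix and a "before" suffix
lemma pv_insertBy_append {α : Type} (before : α → α → Bool) (x : α) :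
    ∀ (l₁ l₂ : List α), (∀ y ∈ l₁, before x y = false) → (∀ y ∈ l₂, before x y = true) →
      PySem.List.insertBy before x (l₁ ++ l₂) = l₁ ++ x :: l₂ := by
  intro l₁
  induction l₁ with
  | nil =>
    intro l₂ _ h2
    cases l₂ with
    | nil => rfl
    | cons b t =>
      rw [List.nil_append, PySem.List.insertBy]
      simp only [h2 b (by simp), if_true]
      rfl
  | cons a l ih =>
    intro l₂ h1 h2
    have ha : before x a = false := h1 a (by simp)
    have htail := ih l₂ (fun y hy => h1 y (by simp [hy])) h2
    rw [List.cons_append, PySem.List.insertBy]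
    simp only [ha, Bool.false_eq_true, if_false]
    rw [htail, List.cons_append]

-- splitting a strictly descending Int list around an absent value k
lemma pv_desc_split_not_mem (k : Int) :
    ∀ (D : List Int), D.Pairwise (· > ·) → k ∉ D →
      D = D.filter (fun s => decide (k < s)) ++ D.filter (fun s => decide (s < k)) := by
  intro D
  induction D with
  | nil => intro _ _; rfl
  | cons d D ih =>
    intro hpw hk
    have hdk : d ≠ k := fun he => hk (by simp [he])
    have htail := (List.pairwise_cons.mp hpw).2
    have hall := (List.pairwise_cons.mp hpw).1
    by_cases hlt : k < d
    · have h2 : ¬ (d < k) := by omega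
      simp only [List.filter_cons, hlt, decide_true, h2, decide_false, if_true, if_false,
        Bool.false_eq_true, List.cons_append]
      congr 1
      exact ih htail (fun hm => hk (by simp [hm]))
    · have hdlt : d < k := by omega
      have h1 : ¬ (k < d) := by omega
      simp only [List.filter_cons, h1, decide_false, hdlt, decide_true, if_true, if_false,
        Bool.false_eq_true]
      have hf1 : D.filter (fun s => decide (k < s)) = [] := by
        rw [List.filter_eq_nil_iff]
        intro a ha
        have : d > a := hall a ha
        simp only [decide_eq_true_eq]
        omega
      have hf2 : D.filter (fun s => decide (s < k)) = D := by
        rw [List.filter_eq_self]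
        intro a ha
        have : d > a := hall a ha
        simp only [decide_eq_true_eq]
        omega
      rw [hf1, hf2, List.nil_append]

-- splitting a strictly descending Int list around a present value k
lemma pv_desc_split_mem (k : Int) :
    ∀ (D : List Int), D.Pairwise (· > ·) → k ∈ D →
      D = D.filter (fun s => decide (k < s)) ++ k :: D.filter (fun s => decide (s < k)) := by
  intro D
  induction D with
  | nil => intro _ h; cases h
  | cons d D ih =>
    intro hpw hk
    have htail := (List.pairwise_cons.mp hpw).2
    have hall := (List.pairwise_cons.mp hpw).1
    by_cases hdk : d = k
    · subst hdk
      have h1 : ¬ (d < d) := by omega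
      simp only [List.filter_cons, h1, decide_false, Bool.false_eq_true, if_false]
      have hf1 : D.filter (fun s => decide (d < s)) = [] := by
        rw [List.filter_eq_nil_iff]
        intro a ha
        have : d > a := hall a ha
        simp only [decide_eq_true_eq]
        omega
      have hf2 : D.filter (fun s => decide (s < d)) = D := by
        rw [List.filter_eq_self]
        intro a ha
        have : d > a := hall a ha
        simp only [decide_eq_true_eq]
        omega
      rw [hf1, hf2, List.nil_append]
    · have hkD : k ∈ D := by
        cases hk with
        | head => exact absurd rfl hdk
        | tail _ h => exact h
      have hkd : k < d := hall k hkD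
      have h2 : ¬ (d < k) := by omega
      simp only [List.filter_cons, hkd, decide_true, h2, decide_false, if_true, if_false,
        Bool.false_eq_true, List.cons_append]
      congr 1
      exact ih htail hkD

-- sorted over an appended singleton is an insertBy into the sorted prefix
lemma pv_sorted_append_singleton {α : Type} (xs : List α) (x : α) (key : α → Int) :
    PySem.List.sorted (xs ++ [x]) key true
      = PySem.List.insertBy (fun a b => decide (key b < key a)) x (PySem.List.sorted xs key true) := by
  rw [PySem.List.sorted_rev_eq_foldl_insertBy, PySem.List.sorted_rev_eq_foldl_insertBy,
    List.foldl_append]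
  rfl

-- inserting x into buckets grouped along a strictly descending key list containing key x:
-- x lands at the end of its own bucket
lemma pv_insert_grouped {α : Type} (key : α → Int) (x : α) (D : List Int) (g : Int → List α)
    (hDpw : D.Pairwise (· > ·)) (hkeyg : ∀ s, ∀ y ∈ g s, key y = s) (hkD : key x ∈ D) :
    PySem.List.insertBy (fun a b => decide (key b < key a)) x (D.flatMap g)
      = D.flatMap (fun s => g s ++ (if key x == s then [x] else [])) := by
  obtain ⟨f₁, f₂, hD, h₁, h₂⟩ :
      ∃ f₁ f₂, D = f₁ ++ key x :: f₂ ∧ (∀ s ∈ f₁, key x < s) ∧ (∀ s ∈ f₂, s < key x) := by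
    refine ⟨_, _, pv_desc_split_mem (key x) D hDpw hkD, ?_, ?_⟩
    · intro s hs
      have := (List.mem_filter.mp hs).2
      simpa using this
    · intro s hs
      have := (List.mem_filter.mp hs).2
      simpa using this
  subst hD
  rw [List.flatMap_append, List.flatMap_cons, List.flatMap_append, List.flatMap_cons,
    ← List.append_assoc]
  rw [pv_insertBy_append (fun a b => decide (key b < key a)) x
      (f₁.flatMap g ++ g (key x)) (f₂.flatMap g)
      (by
        intro y hy
        rcases List.mem_append.mp hy with hy1 | hy2
        · obtain ⟨s, hs, hys⟩ := List.mem_flatMap.mp hy1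
          have hky := hkeyg s y hys
          have := h₁ s hs
          simp only [decide_eq_false_iff_not]
          omega
        · have hky := hkeyg (key x) y hy2
          simp only [decide_eq_false_iff_not]
          omega)
      (by
        intro y hy
        obtain ⟨s, hs, hys⟩ := List.mem_flatMap.mp hy
        have hky := hkeyg s y hys
        have := h₂ s hs
        simp only [decide_eq_true_eq]
        omega)]
  have hgf₁ : f₁.flatMap (fun s => g s ++ (if key x == s then [x] else [])) = f₁.flatMap g := by
    refine pv_flatMap_congr _ _ _ (fun s hs => ?_)
    have := h₁ s hs
    have hne : (key x == s) = false := by simp; omega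
    rw [hne]
    simp
  have hgf₂ : f₂.flatMap (fun s => g s ++ (if key x == s then [x] else [])) = f₂.flatMap g := by
    refine pv_flatMap_congr _ _ _ (fun s hs => ?_)
    have := h₂ s hs
    have hne : (key x == s) = false := by simp; omega
    rw [hne]
    simp
  rw [hgf₁, hgf₂]
  have hself : (key x == key x) = true := by simp
  rw [hself]
  simp [List.append_assoc]

-- inserting x into buckets grouped along a strictly descending key list NOT containing key x:
-- x becomes a new singleton bucket between the larger and the smaller keys
lemma pv_insert_grouped_new {α : Type} (key : α → Int) (x : α) (D : List Int) (g : Int → List α)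
    (hDpw : D.Pairwise (· > ·)) (hkeyg : ∀ s, ∀ y ∈ g s, key y = s) (hkD : key x ∉ D) :
    PySem.List.insertBy (fun a b => decide (key b < key a)) x (D.flatMap g)
      = (D.filter (fun s => decide (key x < s))).flatMap g
          ++ x :: (D.filter (fun s => decide (s < key x))).flatMap g := by
  conv_lhs => rw [pv_desc_split_not_mem (key x) D hDpw hkD]
  rw [List.flatMap_append]
  refine pv_insertBy_append (fun a b => decide (key b < key a)) x _ _ ?_ ?_
  · intro y hy
    obtain ⟨s, hs, hys⟩ := List.mem_flatMap.mp hy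
    have hky := hkeyg s y hys
    have := (List.mem_filter.mp hs).2
    simp only [decide_eq_true_eq] at this
    simp only [decide_eq_false_iff_not]
    omega
  · intro y hy
    obtain ⟨s, hs, hys⟩ := List.mem_flatMap.mp hy
    have hky := hkeyg s y hys
    have := (List.mem_filter.mp hs).2
    simp only [decide_eq_true_eq] at this
    simp only [decide_eq_true_eq]
    omega

-- THE MAIN LEMMA: a stable descending sort equals bucket grouping by key
lemma pv_stable_bucket {α : Type} (key : α → Int) :
    ∀ (xs : List α),
      PySem.List.sorted xs key true
        = (PySem.List.sorted (PySem.Set.ofList (xs.map key)) (fun s => s) true).flatMap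
            (fun s => xs.filter (fun x => key x == s)) := by
  intro xs
  induction xs using List.reverseRecOn with
  | nil => rfl
  | append_singleton xs x ih =>
    have hmapp : (xs ++ [x]).map key = xs.map key ++ [key x] := by simp
    have hDperm : (PySem.List.sorted (PySem.Set.ofList (xs.map key)) (fun s => s) true).Perm
        (PySem.Set.ofList (xs.map key)) := PySem.List.sorted_perm _ _ _
    have hDnodup : (PySem.List.sorted (PySem.Set.ofList (xs.map key)) (fun s => s) true).Nodup :=
      hDperm.nodup_iff.mpr (PySem.Set.nodup_ofList _)
    have hDpw : (PySem.List.sorted (PySem.Set.ofList (xs.map key)) (fun s => s) true).Pairwise (· > ·) := by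
      have h1 := PySem.List.sorted_pairwise_rev (PySem.Set.ofList (xs.map key)) (fun s => s)
      have h2 : (PySem.List.sorted (PySem.Set.ofList (xs.map key)) (fun s => s) true).Pairwise (· ≠ ·) :=
        hDnodup
      exact (h1.and h2).imp (fun {a b} hab => lt_of_le_of_ne hab.1 (Ne.symm hab.2))
    have hkeyg : ∀ s : Int, ∀ y ∈ xs.filter (fun y => key y == s), key y = s := by
      intro s y hy
      have := (List.mem_filter.mp hy).2
      simpa using this
    have hg' : ∀ s : Int, (xs ++ [x]).filter (fun y => key y == s)
        = xs.filter (fun y => key y == s) ++ (if key x == s then [x] else []) := by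
      intro s
      rw [List.filter_append, List.filter_singleton]
      cases h : (key x == s) <;> simp
    rw [pv_sorted_append_singleton, ih, hmapp]
    rw [show PySem.Set.ofList (xs.map key ++ [key x])
        = PySem.Set.add (PySem.Set.ofList (xs.map key)) (key x) from by
      rw [PySem.Set.ofList_eq_foldl, PySem.Set.ofList_eq_foldl, List.foldl_append]; rfl]
    by_cases hmem : key x ∈ PySem.Set.ofList (xs.map key)
    · -- the key already has a bucket: x is appended to it
      rw [show PySem.Set.add (PySem.Set.ofList (xs.map key)) (key x)
          = PySem.Set.ofList (xs.map key) from by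
        simp [PySem.Set.add, PySem.Set.contains, hmem]]
      have hkD : key x ∈ PySem.List.sorted (PySem.Set.ofList (xs.map key)) (fun s => s) true :=
        (PySem.List.mem_sorted _ _ _ _).mpr hmem
      rw [pv_insert_grouped key x _ _ hDpw hkeyg hkD]
      refine (pv_flatMap_congr _ _ _ (fun s _ => ?_)).symm
      rw [hg' s]
    · -- a new key: its bucket is the singleton [x], placed between larger and smaller keys
      rw [show PySem.Set.add (PySem.Set.ofList (xs.map key)) (key x)
          = PySem.Set.ofList (xs.map key) ++ [key x] from by
        simp [PySem.Set.add, PySem.Set.contains, hmem]]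
      have hkD : key x ∉ PySem.List.sorted (PySem.Set.ofList (xs.map key)) (fun s => s) true :=
        fun hc => hmem ((PySem.List.mem_sorted _ _ _ _).mp hc)
      rw [pv_insert_grouped_new key x _ _ hDpw hkeyg hkD]
      have hD'eq : PySem.List.sorted (PySem.Set.ofList (xs.map key) ++ [key x]) (fun s => s) true
          = (PySem.List.sorted (PySem.Set.ofList (xs.map key)) (fun s => s) true).filter
              (fun s => decide (key x < s))
            ++ key x ::
              (PySem.List.sorted (PySem.Set.ofList (xs.map key)) (fun s => s) true).filter
                (fun s => decide (s < key x)) := by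
        refine PySem.List.sorted_rev_eq_of_perm_of_pairwise_gt _ _ _ ?_ ?_
        · refine List.perm_middle.trans ?_
          rw [← pv_desc_split_not_mem (key x) _ hDpw hkD]
          exact (hDperm.cons _).trans (List.perm_append_singleton _ _).symm
        · rw [List.pairwise_append]
          refine ⟨hDpw.sublist List.filter_sublist, ?_, ?_⟩
          · rw [List.pairwise_cons]
            refine ⟨fun b hb => ?_, hDpw.sublist List.filter_sublist⟩
            have := (List.mem_filter.mp hb).2
            simp only [decide_eq_true_eq] at this
            exact this
          · intro a ha b hb
            have ha2 := (List.mem_filter.mp ha).2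
            simp only [decide_eq_true_eq] at ha2
            rcases List.mem_cons.mp hb with hb1 | hb2
            · subst hb1; exact ha2
            · have hb3 := (List.mem_filter.mp hb2).2
              simp only [decide_eq_true_eq] at hb3
              omega
      rw [hD'eq, List.flatMap_append, List.flatMap_cons]
      have hgx : (xs ++ [x]).filter (fun y => key y == key x) = [x] := by
        rw [hg' (key x)]
        have h0 : xs.filter (fun y => key y == key x) = [] := by
          rw [List.filter_eq_nil_iff]
          intro a ha hc
          simp only [beq_iff_eq] at hc
          exact hmem ((PySem.Set.mem_ofList _ _).mpr (hc ▸ List.mem_map_of_mem ha))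
        rw [h0]
        simp
      rw [hgx]
      have hrest : ∀ (f : List Int), (∀ s ∈ f, s ≠ key x) →
          f.flatMap (fun s => (xs ++ [x]).filter (fun y => key y == s))
            = f.flatMap (fun s => xs.filter (fun y => key y == s)) := by
        intro f hf
        refine pv_flatMap_congr _ _ _ (fun s hs => ?_)
        rw [hg' s]
        have : (key x == s) = false := by
          simp only [beq_eq_false_iff_ne]
          exact fun he => hf s hs he.symm
        rw [this]
        simp
      rw [hrest _ (fun s hs => by
        have := (List.mem_filter.mp hs).2
        simp only [decide_eq_true_eq] at this
        omega),
        hrest _ (fun s hs => by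
          have := (List.mem_filter.mp hs).2
          simp only [decide_eq_true_eq] at this
          omega)]
      simp

-- A's port, normalised to "map fst of the stable sort of decorated pairs"
lemma pv_A_norm (skills : List String) (job_text : String) :
    reorder_skills_py skills job_text
      = (PySem.List.sorted (skills.map (fun sk => (sk, pvKey (PySem.Str.lower job_text) sk)))
          (fun p => p.2) true).map (fun p => p.1) := by
  simp only [reorder_skills_py]
  rw [PySem.List.foldl_append_singleton_eq_map
      (f := fun skill => ((skill,
        if PySem.Str.isIn (PySem.Str.lower skill) (PySem.Str.lower job_text) = true then
          ((PySem.Str.count (PySem.Str.lower job_text) (PySem.Str.lower skill) : Nat) : Int)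
        else 0) : String × Int))]
  rw [List.nil_append]
  rw [List.map_congr_left (l := skills)
    (g := fun sk => ((sk, pvKey (PySem.Str.lower job_text) sk) : String × Int))
    (fun sk _ => by
      by_cases h : PySem.Str.isIn (PySem.Str.lower sk) (PySem.Str.lower job_text) = true
      · rw [if_pos h]
        rfl
      · have hf : PySem.Str.isIn (PySem.Str.lower sk) (PySem.Str.lower job_text) = false :=
          Bool.eq_false_iff.mpr h
        have h0 := pv_count_eq_zero (PySem.Str.lower job_text) (PySem.Str.lower sk) hf
        rw [if_neg h]
        simp only [pvKey, h0, Nat.cast_zero])]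

-- B's bucket dict: its value at c is the subsequence of skills scoring c
lemma pv_buckets_getD (t : String) (skills : List String) (c : Int) :
    (skills.foldl (fun d skill =>
        d.modify ((PySem.Str.count t (PySem.Str.lower skill) : Int)) [] (fun cur => cur ++ [skill]))
        PySem.Dict.empty).getD c []
      = skills.filter (fun sk => pvKey t sk == c) := by
  have hm : (skills.map (fun sk => ((pvKey t sk : Int), sk))).foldl
      (fun d p => d.modify p.1 [] (fun cur => cur ++ [p.2])) PySem.Dict.empty
      = skills.foldl (fun d skill =>
          d.modify ((PySem.Str.count t (PySem.Str.lower skill) : Int)) [] (fun cur => cur ++ [skill]))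
          PySem.Dict.empty := by
    rw [List.foldl_map]
    simp only [pvKey]
  rw [← hm, PySem.Dict.getD_foldl_modify_append]
  simp [List.filter_map, List.map_map, Function.comp_def]

-- B's bucket dict: its keys are the distinct scores in first-occurrence order
lemma pv_buckets_keys (t : String) (skills : List String) :
    (skills.foldl (fun d skill =>
        d.modify ((PySem.Str.count t (PySem.Str.lower skill) : Int)) [] (fun cur => cur ++ [skill]))
        PySem.Dict.empty).keys
      = PySem.Set.ofList (skills.map (pvKey t)) := by
  have h := PySem.Dict.keys_foldl_modify_key (κ := Int) (ν := List String) skills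
    (fun sk => ((PySem.Str.count t (PySem.Str.lower sk) : Nat) : Int)) []
    (fun _ x => fun cur => cur ++ [x]) PySem.Dict.empty
  exact h.trans (by rw [PySem.Set.ofList_eq_foldl]; rfl)

-- B's port, normalised to "flatMap of buckets over the sorted distinct keys"
lemma pv_B_norm (skills : List String) (job_text : String) :
    reorder_skills_py_alt skills job_text
      = (PySem.List.sorted (PySem.Set.ofList (skills.map (pvKey (PySem.Str.lower job_text))))
          (fun s => s) true).flatMap
          (fun s => skills.filter (fun sk => pvKey (PySem.Str.lower job_text) sk == s)) := by
  simp only [reorder_skills_py_alt]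
  rw [pv_buckets_keys, PySem.List.foldl_append_eq_flatMap, List.nil_append]
  exact pv_flatMap_congr _ _ _ (fun s _ => pv_buckets_getD _ skills s)

-- ===== VERDICT (by name: the statement is the Claim_ definition above) =====
theorem reorder_skills_py_spec : Claim_equal_reorder_skills_py := by
  intro skills job_text _
  unfold Spec_reorder_skills_py
  rw [pv_A_norm, pv_B_norm]
  rw [pv_stable_bucket (fun p : String × Int => p.2)
    (skills.map (fun sk => (sk, pvKey (PySem.Str.lower job_text) sk)))]
  rw [List.map_flatMap]
  rw [show (skills.map (fun sk => (sk, pvKey (PySem.Str.lower job_text) sk))).map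
      (fun p : String × Int => p.2) = skills.map (pvKey (PySem.Str.lower job_text)) from by
    simp [List.map_map, Function.comp_def]]
  refine pv_flatMap_congr _ _ _ (fun s _ => ?_)
  simp [List.filter_map, List.map_map, Function.comp_def]
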